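-- pv_equiv track=rewrite | github.com/jhwa426/Python | COMPSCI 130/Laboratory/Week11/Lab 18.py | running_sum_over_7
-- ===== SOURCE A (Python) =====
-- def running_sum_over_7(numbers):
--     result = 0
--     if sum(numbers) < 7:
--         return -1
--     else:
--         first_num = numbers[0]
--         if first_num < 7:
--             result = first_num + running_sum_over_7(numbers[1:])
--         return result
-- ===== SOURCE B (Python) =====
-- def running_sum_over_7(numbers):
--     # Single backward pass maintaining the running suffix sum,
--     # instead of recursing and calling sum() at every level.
--     v = -1
--     s = 0
--     for x in reversed(numbers):
--         s += x
--         v = -1 if s < 7 else (0 if x >= 7 else x + v)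
--     return v
-- ===== Notes on version B (the rewrite author's own statement) =====
-- stated objective: alternative
-- what changed: Replaces the recursion that re-sums the remaining list at every level with one backward iterative pass that maintains the suffix sum and the value for each suffix; it trades recursion for iteration and avoids repeated sum() calls, though a timing run did not show it faster on the generated inputs.
import Mathlib
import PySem

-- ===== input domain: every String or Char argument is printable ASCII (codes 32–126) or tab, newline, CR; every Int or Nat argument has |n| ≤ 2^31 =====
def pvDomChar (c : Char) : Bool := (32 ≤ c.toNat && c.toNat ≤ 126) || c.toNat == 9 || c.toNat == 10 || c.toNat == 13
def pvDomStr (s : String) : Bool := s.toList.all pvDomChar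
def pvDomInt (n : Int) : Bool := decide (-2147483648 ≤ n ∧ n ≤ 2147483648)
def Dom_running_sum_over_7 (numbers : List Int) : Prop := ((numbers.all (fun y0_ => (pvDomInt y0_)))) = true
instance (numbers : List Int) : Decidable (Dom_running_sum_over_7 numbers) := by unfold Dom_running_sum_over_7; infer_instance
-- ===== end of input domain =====

-- B replaces A's recursion (which re-sums the list at each level) with a single backward iterative pass maintaining the suffix sum.


-- ===== PORT A =====
-- Literal port of A: sum(numbers) < 7 check, then first element / recurse on the tail.
-- (For [], sum = 0 < 7 so A returns -1 before indexing; the [] equation is that branch.)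
def running_sum_over_7 : List Int → Int
  | [] => -1
  | x :: tl =>
    if (x :: tl).sum < 7 then -1
    else if x < 7 then x + running_sum_over_7 tl else 0

-- ===== PORT B =====
-- Port of B: one backward pass (foldl over the reversed list) carrying (suffix sum, value).
def running_sum_over_7_alt (numbers : List Int) : Int :=
  (numbers.reverse.foldl
    (fun (p : Int × Int) x =>
      (p.1 + x, if p.1 + x < 7 then -1 else if x ≥ 7 then 0 else x + p.2))
    (0, -1)).2

-- ===== PRECONDITION & SPEC =====
def Spec_running_sum_over_7 (numbers : List Int) (out : Int) : Prop := out = running_sum_over_7_alt numbers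
instance (numbers : List Int) (out : Int) : Decidable (Spec_running_sum_over_7 numbers out) := by unfold Spec_running_sum_over_7; infer_instance

-- ===== CLAIM (what is proved, stated in full; the proofs are below) =====
def Claim_equal_running_sum_over_7 : Prop := ∀ (numbers : List Int), Dom_running_sum_over_7 numbers → Spec_running_sum_over_7 numbers (running_sum_over_7 numbers)

-- ===== LEMMAS AND PROOFS =====

-- ===== VERDICT (by name: the statement is the Claim_ definition above) =====
lemma rs7_foldr (l : List Int) :
    l.foldr
      (fun x (p : Int × Int) =>
        (p.1 + x, if p.1 + x < 7 then -1 else if x ≥ 7 then 0 else x + p.2))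
      (0, -1) = (l.sum, running_sum_over_7 l) := by
  induction l with
  | nil => simp [running_sum_over_7]
  | cons x tl ih =>
    simp only [List.foldr_cons, ih, running_sum_over_7, List.sum_cons]
    have h : tl.sum + x = x + tl.sum := by ring
    rw [h]
    by_cases h7 : x + tl.sum < 7
    · simp [h7]
    · by_cases hx : x ≥ 7
      · have hx' : ¬ x < 7 := by omega
        simp [h7, hx, hx']
      · have hx' : x < 7 := by omega
        simp [h7, hx, hx']

theorem running_sum_over_7_spec : Claim_equal_running_sum_over_7 := by
  intro numbers _
  unfold Spec_running_sum_over_7 running_sum_over_7_alt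
  rw [List.foldl_reverse]
  rw [rs7_foldr]
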